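-- pv_equiv track=rewrite | github.com/hemanth506/Scaler-DSA | Scalar/primer-questions/assignment-string-1.py | solve
-- ===== SOURCE A (Python) =====
-- def solve(A):
--     txt = A
--     listTxt = list(txt)
--
--     zeroArray = [];
--     oneArray = [];
--     totalSeparation = 0;
--     id = 0;
--     for i in listTxt:
--         if i == "0":
--             zeroArray.insert(id, i)
--             id = id + 1
--         elif i == "1":
--             oneArray.insert(id, i)
--             id = id + 1;
--
--         if len(zeroArray) == len(oneArray):
--             totalSeparation = totalSeparation + 1
--             zeroArray = [];
--             oneArray = [];
--             id = 0
--
--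
--     return totalSeparation
-- ===== SOURCE B (Python) =====
-- def solve(A):
--     total = 0
--     for i in range(len(A)):
--         prefix = A[:i + 1]
--         if prefix.count("0") == prefix.count("1"):
--             total += 1
--     return total
-- ===== Notes on version B (the rewrite author's own statement) =====
-- stated objective: alternative
-- what changed: Drops A's incremental state (two growing lists, a shared insert index and a reset block) entirely and instead re-derives the answer from the specification: for every prefix A[:i+1] it recounts '0's and '1's with str.count and counts the prefixes where they are equal; this trades A's one-pass bookkeeping for a stateless quadratic scan over prefixes.
import Mathlib
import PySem

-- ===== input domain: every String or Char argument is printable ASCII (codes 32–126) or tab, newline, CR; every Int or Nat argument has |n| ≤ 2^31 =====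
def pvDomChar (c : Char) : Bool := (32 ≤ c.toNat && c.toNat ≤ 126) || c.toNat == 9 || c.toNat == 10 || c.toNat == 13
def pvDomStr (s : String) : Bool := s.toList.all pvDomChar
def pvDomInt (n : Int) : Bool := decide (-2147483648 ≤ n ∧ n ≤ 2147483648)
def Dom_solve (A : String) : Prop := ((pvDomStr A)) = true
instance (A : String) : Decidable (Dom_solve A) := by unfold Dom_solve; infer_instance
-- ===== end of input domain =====

-- B drops A's incremental state (two growing lists, shared insert index, reset block)
-- and instead recounts '0'/'1' in every prefix A[:i+1], counting the balanced ones.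

-- ===== PORT A =====
-- state: (zeroArray, oneArray, totalSeparation, id)
def solveStepA (st : List Char × List Char × Int × Int) (i : Char) :
    List Char × List Char × Int × Int :=
  let (z, o, t, id) := st
  let (z, o, id) :=
    if i = '0' then (PySem.List.insert z id i, o, id + 1)
    else if i = '1' then (z, PySem.List.insert o id i, id + 1)
    else (z, o, id)
  if z.length = o.length then ([], [], t + 1, 0) else (z, o, t, id)

def solve (A : String) : Int :=
  (A.toList.foldl solveStepA ([], [], 0, 0)).2.2.1

-- ===== PORT B =====
def solve_alt (A : String) : Int :=
  (PySem.List.pyRange 0 (PySem.Str.len A)).foldl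
    (fun total i =>
      let pfx := PySem.Str.slice A none (some (i + 1))
      if PySem.Str.count pfx "0" = PySem.Str.count pfx "1" then total + 1 else total)
    0

-- ===== PRECONDITION & SPEC =====
def Spec_solve (A : String) (out : Int) : Prop := out = solve_alt A
instance (A : String) (out : Int) : Decidable (Spec_solve A out) := by unfold Spec_solve; infer_instance

-- ===== CLAIM (what is proved, stated in full; the proofs are below) =====
def Claim_equal_solve : Prop := ∀ (A : String), Dom_solve A → Spec_solve A (solve A)

-- ===== LEMMAS AND PROOFS =====

-- proof-side balance machine: the common meaning of both programs
def balStep (st : Int × Int) (ch : Char) : Int × Int :=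
  let bal := if ch = '0' then st.1 + 1 else if ch = '1' then st.1 - 1 else st.1
  (bal, if bal = 0 then st.2 + 1 else st.2)

-- A's fold equals the balance machine (A's invariant: bal = len zeroArray - len oneArray)
theorem solve_inv (l : List Char) (z o : List Char) (t id bal : Int)
    (h : bal = (z.length : Int) - (o.length : Int)) :
    (l.foldl solveStepA (z, o, t, id)).2.2.1 = (l.foldl balStep (bal, t)).2 := by
  induction l generalizing z o t id bal with
  | nil => simp
  | cons c cs ih =>
    simp only [List.foldl_cons]
    by_cases h0 : c = '0'
    · subst h0
      by_cases he : z.length + 1 = o.length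
      · have hb : bal + 1 = 0 := by omega
        simp [solveStepA, balStep, he, hb]
        exact ih [] [] (t + 1) 0 0 (by simp)
      · have hb : ¬ (bal + 1 = 0) := by omega
        simp [solveStepA, balStep, if_neg he, if_neg hb]
        refine ih _ _ _ _ _ ?_
        have := PySem.List.length_insert z id '0'
        omega
    · by_cases h1 : c = '1'
      · subst h1
        by_cases he : z.length = o.length + 1
        · have hb : bal - 1 = 0 := by omega
          simp [solveStepA, balStep, he, hb]
          exact ih [] [] (t + 1) 0 0 (by simp)
        · have hb : ¬ (bal - 1 = 0) := by omega
          simp [solveStepA, balStep, if_neg he, if_neg hb]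
          refine ih _ _ _ _ _ ?_
          have := PySem.List.length_insert o id '1'
          omega
      · by_cases he : z.length = o.length
        · have hb : bal = 0 := by omega
          simp [solveStepA, balStep, if_neg h0, if_neg h1, he, hb]
          exact ih [] [] (t + 1) 0 0 (by simp)
        · have hb : ¬ (bal = 0) := by omega
          simp [solveStepA, balStep, if_neg h0, if_neg h1, if_neg he, if_neg hb]
          exact ih _ _ _ _ _ h

-- Python str.count with a single-character needle is List.count
theorem chars_count_go_single (c : Char) (l : List Char) (fuel acc : Nat)
    (h : l.length ≤ fuel) :
    PySem.Chars.count.go [c] fuel l acc = acc + l.count c := by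
  induction l generalizing fuel acc with
  | nil => cases fuel <;> simp [PySem.Chars.count.go]
  | cons x xs ih =>
    cases fuel with
    | zero => simp at h
    | succ f =>
      by_cases hx : c = x
      · subst hx
        simp only [PySem.Chars.count.go, List.isPrefixOf, BEq.rfl, Bool.true_and,
          if_true, List.count_cons_self]
        simp only [List.length_cons, List.length_nil, List.drop_succ_cons, List.drop_zero]
        rw [ih f (acc + 1) (by simp at h; omega)]
        omega
      · have hpf : ([c].isPrefixOf (x :: xs)) = false := by
          simp [List.isPrefixOf]
          intro hc
          first
          | exact hx hc
          | exact hx hc.symm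
        simp only [PySem.Chars.count.go, hpf, Bool.false_eq_true, if_false]
        rw [ih f acc (by simp at h; omega)]
        rw [List.count_cons]
        simp [beq_iff_eq]
        try exact fun hc => hx hc.symm

theorem chars_count_single (l : List Char) (c : Char) :
    PySem.Chars.count l [c] = l.count c := by
  have h := chars_count_go_single c l l.length 0 le_rfl
  simp [PySem.Chars.count]
  omega

-- the first component of the balance machine is the 0/1 count difference
theorem balStep_fst (l : List Char) (b t : Int) :
    (l.foldl balStep (b, t)).1 = b + (l.count '0' : Int) - (l.count '1' : Int) := by
  induction l generalizing b t with
  | nil => simp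
  | cons c cs ih =>
    simp only [List.foldl_cons]
    by_cases h0 : c = '0'
    · subst h0; rw [ih]; simp [balStep]; ring
    · by_cases h1 : c = '1'
      · subst h1; rw [ih]; simp [balStep, h0]; ring
      · rw [ih]
        simp [balStep, h0, h1]

-- B as a list program: fold over range(len l) testing counts of take (i+1)
def bList (l : List Char) : Int :=
  (PySem.List.pyRange 0 (l.length : Int)).foldl
    (fun total i =>
      if (l.take (i + 1).toNat).count '0' = (l.take (i + 1).toNat).count '1'
      then total + 1 else total)
    0

theorem bList_eq_bal (l : List Char) : bList l = (l.foldl balStep (0, 0)).2 := by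
  induction l using List.reverseRecOn with
  | nil => simp [bList, PySem.List.pyRange]
  | append_singleton xs c ih =>
    have hlen : ((xs ++ [c]).length : Int) = (xs.length : Int) + 1 := by simp
    have hsplit : PySem.List.pyRange 0 ((xs.length : Int) + 1)
        = PySem.List.pyRange 0 (xs.length : Int) ++ PySem.List.pyRange (xs.length : Int) ((xs.length : Int) + 1) := by
      exact PySem.List.pyRange_one_append 0 (xs.length : Int) ((xs.length : Int) + 1)
        (by positivity) (by omega)
    have hlast : PySem.List.pyRange (xs.length : Int) ((xs.length : Int) + 1) = [(xs.length : Int)] := by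
      rw [PySem.List.pyRange_one_cons (by omega)]
      simp [PySem.List.pyRange]
    unfold bList
    rw [hlen, hsplit, hlast, List.foldl_append, List.foldl_cons, List.foldl_nil]
    have hcongr : (PySem.List.pyRange 0 (xs.length : Int)).foldl
        (fun total i =>
          if ((xs ++ [c]).take (i + 1).toNat).count '0' = ((xs ++ [c]).take (i + 1).toNat).count '1'
          then total + 1 else total) 0
        = bList xs := by
      unfold bList
      apply PySem.List.foldl_congr_mem
      intro acc i hi
      have hi' := PySem.List.mem_pyRange_one.mp hi
      have htake : (xs ++ [c]).take (i + 1).toNat = xs.take (i + 1).toNat := by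
        apply List.take_append_of_le_length
        omega
      rw [htake]
    rw [hcongr, ih]
    have htake : ((xs ++ [c]).take ((xs.length : Int) + 1).toNat) = xs ++ [c] := by
      apply List.take_of_length_le
      simp
    rw [htake]
    rw [List.foldl_append, List.foldl_cons, List.foldl_nil]
    have h2 := balStep_fst (xs ++ [c]) 0 0
    rw [List.foldl_append, List.foldl_cons, List.foldl_nil] at h2
    have hsnd : (balStep (xs.foldl balStep (0, 0)) c).2
        = if (balStep (xs.foldl balStep (0, 0)) c).1 = 0
          then (xs.foldl balStep (0, 0)).2 + 1 else (xs.foldl balStep (0, 0)).2 := rfl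
    rw [hsnd, h2]
    by_cases hc : (xs ++ [c]).count '0' = (xs ++ [c]).count '1'
    · simp [hc]
    · have hne : ¬ ((0:Int) + ((xs ++ [c]).count '0' : Int) - ((xs ++ [c]).count '1' : Int) = 0) := by
        omega
      rw [if_neg hc, if_neg hne]

theorem solve_alt_eq_bList (A : String) : solve_alt A = bList A.toList := by
  unfold solve_alt bList
  rw [PySem.Str.len_eq]
  apply PySem.List.foldl_congr_mem
  intro acc i hi
  have hi' := PySem.List.mem_pyRange_one.mp hi
  have h1 : (0:Int) ≤ i + 1 := by omega
  simp only [PySem.Str.count_eq, PySem.Str.toList_slice, PySem.Chars.slice_eq_listSlice]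
  rw [PySem.List.slice_to A.toList h1]
  have hz : "0".toList = ['0'] := rfl
  have ho : "1".toList = ['1'] := rfl
  rw [hz, ho, chars_count_single, chars_count_single]

-- ===== VERDICT (by name: the statement is the Claim_ definition above) =====
theorem solve_spec : Claim_equal_solve := by
  intro A _
  unfold Spec_solve solve
  rw [solve_inv A.toList [] [] 0 0 0 (by simp), ← bList_eq_bal, solve_alt_eq_bList]
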